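-- pv_equiv track=rewrite | github.com/Zalitzs/vla-sim-loop | compare_llm_comprehensive.py | analyze_maze_categories
-- ===== SOURCE A (Python) =====
-- def analyze_maze_categories(baseline_results, llm_results, test_mazes):
--     """Categorize mazes by which agent(s) solved them"""
--
--     both_solved = []
--     only_baseline = []
--     only_llm = []
--     neither = []
--
--     for i in range(len(test_mazes)):
--         baseline_success = baseline_results['success_flags'][i]
--         llm_success = llm_results['success_flags'][i]
--
--         if baseline_success and llm_success:
--             both_solved.append(i)
--         elif baseline_success and not llm_success:
--             only_baseline.append(i)
--         elif not baseline_success and llm_success: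
--             only_llm.append(i)
--         else:
--             neither.append(i)
--
--     return {
--         'both_solved': both_solved,
--         'only_baseline': only_baseline,
--         'only_llm': only_llm,
--         'neither': neither
--     }
-- ===== SOURCE B (Python) =====
-- def analyze_maze_categories(baseline_results, llm_results, test_mazes):
--     """Categorize mazes by which agent(s) solved them"""
--     n = len(test_mazes)
--     return {
--         'both_solved': [i for i in range(n)
--                         if baseline_results['success_flags'][i] and llm_results['success_flags'][i]],
--         'only_baseline': [i for i in range(n)
--                           if baseline_results['success_flags'][i] and not llm_results['success_flags'][i]],
--         'only_llm': [i for i in range(n)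
--                      if not baseline_results['success_flags'][i] and llm_results['success_flags'][i]],
--         'neither': [i for i in range(n)
--                     if not baseline_results['success_flags'][i] and not llm_results['success_flags'][i]],
--     }
-- ===== Notes on version B (the rewrite author's own statement) =====
-- stated objective: simpler
-- what changed: Replaces the single interleaved if/elif accumulation loop with four independent list comprehensions, one per category, assembled directly into the result dict; Pre_ excludes inputs where A raises (missing 'success_flags' key or flag lists shorter than test_mazes), on which both programs raise.
import Mathlib
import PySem

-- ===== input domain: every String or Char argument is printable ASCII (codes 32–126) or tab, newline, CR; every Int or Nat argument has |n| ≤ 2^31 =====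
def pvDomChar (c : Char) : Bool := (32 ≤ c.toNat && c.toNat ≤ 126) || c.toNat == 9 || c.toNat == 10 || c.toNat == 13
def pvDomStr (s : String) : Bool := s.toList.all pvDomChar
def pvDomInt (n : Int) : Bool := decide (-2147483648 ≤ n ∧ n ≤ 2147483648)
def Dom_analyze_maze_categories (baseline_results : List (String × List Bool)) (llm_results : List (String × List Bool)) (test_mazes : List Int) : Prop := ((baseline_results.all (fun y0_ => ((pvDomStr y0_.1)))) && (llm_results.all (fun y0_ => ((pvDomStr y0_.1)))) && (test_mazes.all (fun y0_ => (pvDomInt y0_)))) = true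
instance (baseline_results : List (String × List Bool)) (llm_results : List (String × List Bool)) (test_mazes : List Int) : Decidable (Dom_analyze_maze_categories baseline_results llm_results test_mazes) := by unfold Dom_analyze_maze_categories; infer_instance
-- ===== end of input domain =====

-- B replaces A's single interleaved if/elif pass with four independent filtered scans of range(n) (objective: simpler).

-- ===== PORT A =====
-- d['success_flags'] lookup; under Pre_ the key is present, so the getD [] default is never used.
def pvFlagsA (d : List (String × List Bool)) : List Bool :=
  (((PySem.Dict.mk d).get? "success_flags").getD [])

def analyze_maze_categories (baseline_results : List (String × List Bool)) (llm_results : List (String × List Bool)) (test_mazes : List Int) : List (String × List Int) :=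
  let bf := pvFlagsA baseline_results
  let lf := pvFlagsA llm_results
  let r := (PySem.List.pyRange 0 (test_mazes.length) 1).foldl
    (fun (acc : List Int × List Int × List Int × List Int) i =>
      -- flags[i]; under Pre_ the index is in range, so the false default is never used
      let bs := PySem.List.pyGetD bf i false
      let ls := PySem.List.pyGetD lf i false
      if bs && ls then (acc.1 ++ [i], acc.2.1, acc.2.2.1, acc.2.2.2)
      else if bs && !ls then (acc.1, acc.2.1 ++ [i], acc.2.2.1, acc.2.2.2)
      else if !bs && ls then (acc.1, acc.2.1, acc.2.2.1 ++ [i], acc.2.2.2)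
      else (acc.1, acc.2.1, acc.2.2.1, acc.2.2.2 ++ [i]))
    ([], [], [], [])
  [("both_solved", r.1), ("only_baseline", r.2.1), ("only_llm", r.2.2.1), ("neither", r.2.2.2)]

-- ===== PORT B =====
-- lookup baseline_results['success_flags'][i] inline, as Source B's comprehensions do; the getD/false
-- defaults are never used under Pre_
def pvFlagB (d : List (String × List Bool)) (i : Int) : Bool :=
  PySem.List.pyGetD (((PySem.Dict.mk d).get? "success_flags").getD []) i false

def analyze_maze_categories_alt (baseline_results : List (String × List Bool)) (llm_results : List (String × List Bool)) (test_mazes : List Int) : List (String × List Int) :=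
  let rng := PySem.List.pyRange 0 (test_mazes.length) 1
  [("both_solved", rng.filter (fun i => pvFlagB baseline_results i && pvFlagB llm_results i)),
   ("only_baseline", rng.filter (fun i => pvFlagB baseline_results i && !pvFlagB llm_results i)),
   ("only_llm", rng.filter (fun i => !pvFlagB baseline_results i && pvFlagB llm_results i)),
   ("neither", rng.filter (fun i => !pvFlagB baseline_results i && !pvFlagB llm_results i))]

-- ===== PRECONDITION & SPEC =====
-- Pre_ excludes exactly the inputs where Python A raises: a nonempty test_mazes together with a
-- missing 'success_flags' key (KeyError) or a flags list shorter than test_mazes (IndexError).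
def Pre_analyze_maze_categories (baseline_results : List (String × List Bool)) (llm_results : List (String × List Bool)) (test_mazes : List Int) : Prop :=
  test_mazes = [] ∨
  (((PySem.Dict.mk baseline_results).get? "success_flags").isSome = true ∧
  ((PySem.Dict.mk llm_results).get? "success_flags").isSome = true ∧
  test_mazes.length ≤ (((PySem.Dict.mk baseline_results).get? "success_flags").getD []).length ∧
  test_mazes.length ≤ (((PySem.Dict.mk llm_results).get? "success_flags").getD []).length)
instance (baseline_results : List (String × List Bool)) (llm_results : List (String × List Bool)) (test_mazes : List Int) : Decidable (Pre_analyze_maze_categories baseline_results llm_results test_mazes) := by unfold Pre_analyze_maze_categories; infer_instance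

def pvWitness_analyze_maze_categories : (List (String × List Bool)) × (List (String × List Bool)) × List Int :=
  ([("success_flags", [true, false, true])], [("success_flags", [true, true, false])], [10, 20, 30])

def Spec_analyze_maze_categories (baseline_results : List (String × List Bool)) (llm_results : List (String × List Bool)) (test_mazes : List Int) (out : List (String × List Int)) : Prop := out = analyze_maze_categories_alt baseline_results llm_results test_mazes
instance (baseline_results : List (String × List Bool)) (llm_results : List (String × List Bool)) (test_mazes : List Int) (out : List (String × List Int)) : Decidable (Spec_analyze_maze_categories baseline_results llm_results test_mazes out) := by unfold Spec_analyze_maze_categories; infer_instance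

-- ===== CLAIM (what is proved, stated in full; the proofs are below) =====
def Claim_equal_analyze_maze_categories : Prop := ∀ (baseline_results : List (String × List Bool)) (llm_results : List (String × List Bool)) (test_mazes : List Int), Dom_analyze_maze_categories baseline_results llm_results test_mazes → Pre_analyze_maze_categories baseline_results llm_results test_mazes → Spec_analyze_maze_categories baseline_results llm_results test_mazes (analyze_maze_categories baseline_results llm_results test_mazes)

-- ===== LEMMAS AND PROOFS =====

lemma foldl_quad (b l : Int → Bool) (xs : List Int) (a1 a2 a3 a4 : List Int) :
    xs.foldl
      (fun (acc : List Int × List Int × List Int × List Int) i =>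
        if b i && l i then (acc.1 ++ [i], acc.2.1, acc.2.2.1, acc.2.2.2)
        else if b i && !l i then (acc.1, acc.2.1 ++ [i], acc.2.2.1, acc.2.2.2)
        else if !b i && l i then (acc.1, acc.2.1, acc.2.2.1 ++ [i], acc.2.2.2)
        else (acc.1, acc.2.1, acc.2.2.1, acc.2.2.2 ++ [i]))
      (a1, a2, a3, a4)
    = (a1 ++ xs.filter (fun i => b i && l i),
       a2 ++ xs.filter (fun i => b i && !l i),
       a3 ++ xs.filter (fun i => !b i && l i),
       a4 ++ xs.filter (fun i => !b i && !l i)) := by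
  induction xs generalizing a1 a2 a3 a4 with
  | nil => simp
  | cons x xs ih =>
    rw [List.foldl_cons]
    cases hb : b x <;> cases hl : l x <;>
      simp only [hb, hl, Bool.and_true, Bool.and_false, Bool.not_true, Bool.not_false,
        ite_true, ite_false, Bool.false_eq_true] <;>
      rw [ih] <;>
      simp [hb, hl]

-- ===== VERDICT (by name: the statement is the Claim_ definition above) =====
theorem analyze_maze_categories_spec : Claim_equal_analyze_maze_categories := by
  intro br lr tm _ _
  unfold Spec_analyze_maze_categories analyze_maze_categories analyze_maze_categories_alt pvFlagsA pvFlagB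
  simp only [foldl_quad, List.nil_append]
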